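-- pv_equiv track=rewrite | github.com/KSeo-stack/aimoneyhacks-blog | main.py | parse_reference_blocks
-- ===== SOURCE A (Python) =====
-- def parse_reference_blocks(context):
--     blocks = []
--     current = None
--
--     for line in (context or "").splitlines():
--         line = line.strip()
--
--         if line.startswith("Title:"):
--             if current:
--                 blocks.append(current)
--
--             current = {
--                 "title": line.replace("Title:", "", 1).strip(),
--                 "snippet": "",
--                 "url": ""
--             }
--
--         elif line.startswith("Snippet:") and current:
--             current["snippet"] = line.replace("Snippet:", "", 1).strip()
--
--         elif line.startswith("URL:") and current:
--             current["url"] = line.replace("URL:", "", 1).strip()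
--
--     if current:
--         blocks.append(current)
--
--     return blocks
-- ===== SOURCE B (Python) =====
-- def _last_field(seg, prefix):
--     for x in reversed(seg):
--         if x.startswith(prefix):
--             return x[len(prefix):].strip()
--     return ""
--
--
-- def parse_reference_blocks(context):
--     lines = [l.strip() for l in (context or "").splitlines()]
--     segments = []
--     for l in lines:
--         if l.startswith("Title:"):
--             segments.append([l])
--         elif segments:
--             segments[-1].append(l)
--     return [
--         {
--             "title": seg[0][len("Title:"):].strip(),
--             "snippet": _last_field(seg, "Snippet:"),
--             "url": _last_field(seg, "URL:"),
--         }
--         for seg in segments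
--     ]
-- ===== Notes on version B (the rewrite author's own statement) =====
-- stated objective: alternative
-- what changed: Replaces A's single stateful scan (a live 'current' dict mutated line by line) with a three-stage pipeline: strip all lines, partition them into 'Title:'-led segments (discarding lines before the first title), then map each segment to a block whose snippet/url are taken from the last matching line of the segment.
import Mathlib
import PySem

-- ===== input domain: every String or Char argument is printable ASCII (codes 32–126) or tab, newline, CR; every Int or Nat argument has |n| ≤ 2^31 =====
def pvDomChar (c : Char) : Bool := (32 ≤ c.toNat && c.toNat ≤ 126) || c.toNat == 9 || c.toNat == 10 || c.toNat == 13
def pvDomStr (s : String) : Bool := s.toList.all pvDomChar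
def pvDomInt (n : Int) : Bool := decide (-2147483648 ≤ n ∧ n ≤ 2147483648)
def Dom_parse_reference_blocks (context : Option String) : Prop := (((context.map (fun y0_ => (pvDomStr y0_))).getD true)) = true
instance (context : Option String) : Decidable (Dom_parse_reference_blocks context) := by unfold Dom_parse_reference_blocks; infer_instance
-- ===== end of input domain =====

-- B re-decomposes A's single stateful scan into: strip lines, partition into 'Title:'-led
-- segments, then map each segment to a block taking the LAST 'Snippet:'/'URL:' line
-- (objective: alternative decomposition, same cost).

-- ===== PORT A =====
-- hand port of s.replace(old, new, 1) (count-limited replace is not in PySem): scan left to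
-- right, splice `new` in for the FIRST occurrence of `old` (empty `old` matches at position 0);
-- exact for count = 1.
def pvReplace1Chars (old new : List Char) : List Char → List Char
  | [] => if old.isPrefixOf ([] : List Char) then new else []
  | c :: rest =>
    if old.isPrefixOf (c :: rest) then new ++ (c :: rest).drop old.length
    else c :: pvReplace1Chars old new rest

def pvReplace1 (s old new : String) : String :=
  String.ofList (pvReplace1Chars old.toList new.toList s.toList)

-- loop body of A; `if current:` is dict truthiness, and A's `current` dict always holds
-- three items, so it is exactly `isSome`.
def pvStepA (st : List (List (String × String)) × Option (PySem.Dict String String))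
    (line0 : String) : List (List (String × String)) × Option (PySem.Dict String String) :=
  let line := PySem.Str.strip line0
  if PySem.Str.startswith line "Title:" then
    ((match st.2 with | some c => st.1 ++ [c.items] | none => st.1),
     some (PySem.Dict.ofList
       [("title", PySem.Str.strip (pvReplace1 line "Title:" "")),
        ("snippet", ""), ("url", "")]))
  else if PySem.Str.startswith line "Snippet:" && st.2.isSome then
    (st.1, st.2.map (fun c => c.insert "snippet" (PySem.Str.strip (pvReplace1 line "Snippet:" ""))))
  else if PySem.Str.startswith line "URL:" && st.2.isSome then
    (st.1, st.2.map (fun c => c.insert "url" (PySem.Str.strip (pvReplace1 line "URL:" ""))))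
  else st

def parse_reference_blocks (context : Option String) : List (List (String × String)) :=
  let st := (PySem.Str.splitlines (context.getD "")).foldl pvStepA ([], none)
  match st.2 with | some c => st.1 ++ [c.items] | none => st.1

-- ===== PORT B =====
-- last line of `seg` starting with `pre`, with the prefix removed and stripped (Source B's
-- _last_field: first match over reversed(seg))
def pvLastField (seg : List String) (pre : String) : String :=
  match seg.reverse.find? (fun x => PySem.Str.startswith x pre) with
  | some x => PySem.Str.strip (PySem.Str.slice x (some (PySem.Str.len pre)) none)
  | none => ""

def pvSegStep (segs : List (List String)) (l : String) : List (List String) :=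
  if PySem.Str.startswith l "Title:" then segs ++ [[l]]
  else if segs.isEmpty then segs
  else segs.dropLast ++ [segs.getLastD [] ++ [l]]

def pvBlockOf (seg : List String) : List (String × String) :=
  [("title", PySem.Str.strip (PySem.Str.slice (seg.headD "") (some (PySem.Str.len "Title:")) none)),
   ("snippet", pvLastField seg "Snippet:"),
   ("url", pvLastField seg "URL:")]

def parse_reference_blocks_alt (context : Option String) : List (List (String × String)) :=
  (((PySem.Str.splitlines (context.getD "")).map PySem.Str.strip).foldl pvSegStep []).map pvBlockOf

-- ===== PRECONDITION & SPEC =====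
def Spec_parse_reference_blocks (context : Option String) (out : List (List (String × String))) : Prop := out = parse_reference_blocks_alt context
instance (context : Option String) (out : List (List (String × String))) : Decidable (Spec_parse_reference_blocks context out) := by unfold Spec_parse_reference_blocks; infer_instance

-- ===== CLAIM (what is proved, stated in full; the proofs are below) =====
def Claim_equal_parse_reference_blocks : Prop := ∀ (context : Option String), Dom_parse_reference_blocks context → Spec_parse_reference_blocks context (parse_reference_blocks context)

-- ===== LEMMAS AND PROOFS =====

/-- the block rendered from a (title, snippet, url) triple -/
def pvBlk (c : String × String × String) : List (String × String) :=
  [("title", c.1), ("snippet", c.2.1), ("url", c.2.2)]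

def pvRender (c : String × String × String) : PySem.Dict String String :=
  PySem.Dict.ofList [("title", c.1), ("snippet", c.2.1), ("url", c.2.2)]

def pvTVal (l : String) : String := PySem.Str.strip (pvReplace1 l "Title:" "")
def pvSVal (l : String) : String := PySem.Str.strip (pvReplace1 l "Snippet:" "")
def pvUVal (l : String) : String := PySem.Str.strip (pvReplace1 l "URL:" "")

/-- A's remaining output from a live current-triple, over already-stripped lines -/
def pvRun : List String → String × String × String → List (List (String × String))
  | [], c => [pvBlk c]
  | l :: ls, c =>
    if PySem.Str.startswith l "Title:" then pvBlk c :: pvRun ls (pvTVal l, "", "")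
    else if PySem.Str.startswith l "Snippet:" then pvRun ls (c.1, pvSVal l, c.2.2)
    else if PySem.Str.startswith l "URL:" then pvRun ls (c.1, c.2.1, pvUVal l)
    else pvRun ls c

/-- A's output before the first Title line, over already-stripped lines -/
def pvRun0 : List String → List (List (String × String))
  | [] => []
  | l :: ls => if PySem.Str.startswith l "Title:" then pvRun ls (pvTVal l, "", "") else pvRun0 ls

def pvFinish (st : List (List (String × String)) × Option (PySem.Dict String String)) :
    List (List (String × String)) :=
  match st.2 with | some c => st.1 ++ [c.items] | none => st.1

/-- B's field extraction of a segment, as a triple -/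
def pvVals (seg : List String) : String × String × String :=
  (PySem.Str.strip (PySem.Str.slice (seg.headD "") (some (PySem.Str.len "Title:")) none),
   pvLastField seg "Snippet:", pvLastField seg "URL:")

theorem pvItems_render (c : String × String × String) : (pvRender c).items = pvBlk c := rfl

theorem pvItems_ofList (t u v : String) :
    (PySem.Dict.ofList [("title", t), ("snippet", u), ("url", v)]).items =
      [("title", t), ("snippet", u), ("url", v)] := rfl

theorem pvInsert_snippet_ofList (t u v w : String) :
    (PySem.Dict.ofList [("title", t), ("snippet", u), ("url", v)]).insert "snippet" w =
      PySem.Dict.ofList [("title", t), ("snippet", w), ("url", v)] := rfl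

theorem pvInsert_url_ofList (t u v w : String) :
    (PySem.Dict.ofList [("title", t), ("snippet", u), ("url", v)]).insert "url" w =
      PySem.Dict.ofList [("title", t), ("snippet", u), ("url", w)] := rfl

theorem pvReplace1Chars_prefix (old new s : List Char) (h0 : old ≠ []) (h : old <+: s) :
    pvReplace1Chars old new s = new ++ s.drop old.length := by
  cases s with
  | nil => cases h0 (List.prefix_nil.mp h)
  | cons c rest =>
      rw [pvReplace1Chars, if_pos (List.isPrefixOf_iff_prefix.mpr h)]

/-- the A-value (count-1 replace) and the B-value (slice) of a matching line agree -/
theorem pvExtract_eq (l p : String) (h0 : p.toList ≠ []) (h : PySem.Str.startswith l p = true) :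
    PySem.Str.strip (PySem.Str.slice l (some (PySem.Str.len p)) none) =
      PySem.Str.strip (pvReplace1 l p "") := by
  have hpre : p.toList <+: l.toList := by
    have := (PySem.Chars.startswith_iff l.toList p.toList).mp (by simpa [PySem.Str.startswith_eq] using h)
    exact this
  have h1 : pvReplace1 l p "" = String.ofList (l.toList.drop p.toList.length) := by
    unfold pvReplace1
    rw [pvReplace1Chars_prefix _ _ _ (by simpa using h0) hpre]
    simp
  have h2 : PySem.Str.slice l (some (PySem.Str.len p)) none =
      String.ofList (l.toList.drop p.toList.length) := by
    unfold PySem.Str.slice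
    congr 1
    have : PySem.Str.len p = (p.toList.length : Int) := by
      simp [PySem.Str.len_eq]
    rw [this]
    simp [PySem.Chars.slice_eq_listSlice, PySem.List.slice_from_natCast]
  rw [h1, h2]

theorem pvTitle_not_snippet (l : String) (h : PySem.Str.startswith l "Title:" = true) :
    PySem.Str.startswith l "Snippet:" = false := by
  by_contra hc
  have h1 : ("Title:".toList) <+: l.toList :=
    (PySem.Chars.startswith_iff _ _).mp (by simpa [PySem.Str.startswith_eq] using h)
  have h2 : ("Snippet:".toList) <+: l.toList := by
    simp only [Bool.not_eq_false] at hc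
    exact (PySem.Chars.startswith_iff _ _).mp (by simpa [PySem.Str.startswith_eq] using hc)
  obtain ⟨t1, e1⟩ := h1
  obtain ⟨t2, e2⟩ := h2
  rw [← e1] at e2
  simp at e2

theorem pvTitle_not_url (l : String) (h : PySem.Str.startswith l "Title:" = true) :
    PySem.Str.startswith l "URL:" = false := by
  by_contra hc
  have h1 : ("Title:".toList) <+: l.toList :=
    (PySem.Chars.startswith_iff _ _).mp (by simpa [PySem.Str.startswith_eq] using h)
  have h2 : ("URL:".toList) <+: l.toList := by
    simp only [Bool.not_eq_false] at hc
    exact (PySem.Chars.startswith_iff _ _).mp (by simpa [PySem.Str.startswith_eq] using hc)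
  obtain ⟨t1, e1⟩ := h1
  obtain ⟨t2, e2⟩ := h2
  rw [← e1] at e2
  simp at e2

theorem pvSnippet_not_url (l : String) (h : PySem.Str.startswith l "Snippet:" = true) :
    PySem.Str.startswith l "URL:" = false := by
  by_contra hc
  have h1 : ("Snippet:".toList) <+: l.toList :=
    (PySem.Chars.startswith_iff _ _).mp (by simpa [PySem.Str.startswith_eq] using h)
  have h2 : ("URL:".toList) <+: l.toList := by
    simp only [Bool.not_eq_false] at hc
    exact (PySem.Chars.startswith_iff _ _).mp (by simpa [PySem.Str.startswith_eq] using hc)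
  obtain ⟨t1, e1⟩ := h1
  obtain ⟨t2, e2⟩ := h2
  rw [← e1] at e2
  simp at e2

theorem pvLemA (ls : List String) : ∀ (blocks : List (List (String × String)))
    (c : String × String × String),
    pvFinish (ls.foldl pvStepA (blocks, some (pvRender c))) =
      blocks ++ pvRun (ls.map PySem.Str.strip) c := by
  induction ls with
  | nil => intro blocks c; simp [pvFinish, pvRun, pvItems_render]
  | cons l ls ih =>
      intro blocks c
      simp only [List.foldl_cons, List.map_cons]
      by_cases hT : PySem.Str.startswith (PySem.Str.strip l) "Title:" = true
      · have hT2 := hT; simp at hT2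
        rw [show pvStepA (blocks, some (pvRender c)) l =
            (blocks ++ [pvBlk c], some (pvRender (pvTVal (PySem.Str.strip l), "", ""))) by
            simp [pvStepA, hT2, pvRender, pvTVal, pvItems_ofList, pvBlk]]
        rw [ih, pvRun, if_pos hT]
        simp
      · have hT2 := hT; simp at hT2
        by_cases hS : PySem.Str.startswith (PySem.Str.strip l) "Snippet:" = true
        · have hS2 := hS; simp at hS2
          rw [show pvStepA (blocks, some (pvRender c)) l =
              (blocks, some (pvRender (c.1, pvSVal (PySem.Str.strip l), c.2.2))) by
              simp [pvStepA, hT2, hS2, pvRender, pvInsert_snippet_ofList, pvSVal]]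
          rw [ih, pvRun, if_neg hT, if_pos hS]
        · have hS2 := hS; simp at hS2
          by_cases hU : PySem.Str.startswith (PySem.Str.strip l) "URL:" = true
          · have hU2 := hU; simp at hU2
            rw [show pvStepA (blocks, some (pvRender c)) l =
                (blocks, some (pvRender (c.1, c.2.1, pvUVal (PySem.Str.strip l)))) by
                simp [pvStepA, hT2, hS2, hU2, pvRender, pvInsert_url_ofList, pvUVal]]
            rw [ih, pvRun, if_neg hT, if_neg hS, if_pos hU]
          · have hU2 := hU; simp at hU2
            rw [show pvStepA (blocks, some (pvRender c)) l = (blocks, some (pvRender c)) by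
                simp [pvStepA, hT2, hS2, hU2]]
            rw [ih, pvRun, if_neg hT, if_neg hS, if_neg hU]

theorem pvLemA0 (ls : List String) : ∀ (blocks : List (List (String × String))),
    pvFinish (ls.foldl pvStepA (blocks, none)) = blocks ++ pvRun0 (ls.map PySem.Str.strip) := by
  induction ls with
  | nil => intro blocks; simp [pvFinish, pvRun0]
  | cons l ls ih =>
      intro blocks
      simp only [List.foldl_cons, List.map_cons]
      by_cases hT : PySem.Str.startswith (PySem.Str.strip l) "Title:" = true
      · have hT2 := hT; simp at hT2
        rw [show pvStepA (blocks, none) l =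
            (blocks, some (pvRender (pvTVal (PySem.Str.strip l), "", ""))) by
            simp [pvStepA, hT2, pvRender, pvTVal]]
        rw [pvLemA, pvRun0, if_pos hT]
      · have hT2 := hT; simp at hT2
        rw [show pvStepA (blocks, none) l = (blocks, none) by
            simp [pvStepA, hT2]]
        rw [ih, pvRun0, if_neg hT]

theorem pvSegs_append (ls : List String) : ∀ (acc segs : List (List String)), segs ≠ [] →
    ls.foldl pvSegStep (acc ++ segs) = acc ++ ls.foldl pvSegStep segs := by
  induction ls with
  | nil => intro acc segs _; rfl
  | cons l ls ih =>
      intro acc segs hne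
      simp only [List.foldl_cons]
      by_cases hT : PySem.Str.startswith l "Title:" = true
      · have hT2 := hT; simp at hT2
        rw [show pvSegStep (acc ++ segs) l = acc ++ (segs ++ [[l]]) by
            simp [pvSegStep, hT2]]
        rw [show pvSegStep segs l = segs ++ [[l]] by simp [pvSegStep, hT2]]
        exact ih acc (segs ++ [[l]]) (by simp)
      · have hT2 := hT; simp at hT2
        rw [show pvSegStep (acc ++ segs) l = acc ++ (segs.dropLast ++ [segs.getLastD [] ++ [l]]) by
            simp [pvSegStep, hT2, List.isEmpty_iff, hne, List.dropLast_append_of_ne_nil hne,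
              List.getLastD_eq_getLast?, List.getLast?_append_of_ne_nil _ hne]]
        rw [show pvSegStep segs l = segs.dropLast ++ [segs.getLastD [] ++ [l]] by
            simp [pvSegStep, hT2, List.isEmpty_iff, hne]]
        exact ih acc _ (by simp)

theorem pvLastField_append (seg : List String) (l : String) (p : String) :
    pvLastField (seg ++ [l]) p =
      if PySem.Str.startswith l p then
        PySem.Str.strip (PySem.Str.slice l (some (PySem.Str.len p)) none)
      else pvLastField seg p := by
  unfold pvLastField
  rw [List.reverse_append]
  by_cases h : PySem.Str.startswith l p = true
  · have h2 := h; simp at h2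
    simp [h2]
  · have h2 := h; simp at h2
    simp [h2]

theorem pvVals_single (l : String) (hT : PySem.Str.startswith l "Title:" = true) :
    pvVals [l] = (pvTVal l, "", "") := by
  have hS2 := pvTitle_not_snippet l hT; simp at hS2
  have hU2 := pvTitle_not_url l hT; simp at hU2
  unfold pvVals pvLastField
  simp [List.find?, hS2, hU2]
  exact pvExtract_eq l "Title:" (by decide) hT

theorem pvLemB (ls : List String) : ∀ (seg : List String), seg ≠ [] →
    (ls.foldl pvSegStep [seg]).map pvBlockOf = pvRun ls (pvVals seg) := by
  induction ls with
  | nil => intro seg _; simp [pvRun, pvBlockOf, pvVals, pvBlk]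
  | cons l ls ih =>
      intro seg hne
      simp only [List.foldl_cons]
      by_cases hT : PySem.Str.startswith l "Title:" = true
      · have hT2 := hT; simp at hT2
        rw [show pvSegStep [seg] l = [seg] ++ [[l]] by simp [pvSegStep, hT2]]
        rw [pvSegs_append ls [seg] [[l]] (by simp), List.map_append]
        rw [ih [l] (by simp), pvVals_single l hT]
        rw [pvRun, if_pos hT]
        simp [pvBlockOf, pvVals, pvBlk]
      · have hT2 := hT; simp at hT2
        rw [show pvSegStep [seg] l = [seg ++ [l]] by
            simp [pvSegStep, hT2]]
        rw [ih (seg ++ [l]) (by simp)]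
        have hhead : (seg ++ [l]).headD "" = seg.headD "" := by
          cases seg with
          | nil => cases hne rfl
          | cons a t => simp
        rw [pvRun, if_neg hT]
        by_cases hS : PySem.Str.startswith l "Snippet:" = true
        · rw [if_pos hS]
          refine congrArg (pvRun ls) ?_
          unfold pvVals
          rw [hhead, pvLastField_append, pvLastField_append, if_pos hS,
            if_neg (by simpa using pvSnippet_not_url l hS)]
          rw [pvExtract_eq l "Snippet:" (by decide) hS]
          simp [pvSVal]
        · rw [if_neg hS]
          by_cases hU : PySem.Str.startswith l "URL:" = true
          · rw [if_pos hU]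
            refine congrArg (pvRun ls) ?_
            unfold pvVals
            rw [hhead, pvLastField_append, pvLastField_append, if_neg hS, if_pos hU]
            rw [pvExtract_eq l "URL:" (by decide) hU]
            simp [pvUVal]
          · rw [if_neg hU]
            refine congrArg (pvRun ls) ?_
            unfold pvVals
            rw [hhead, pvLastField_append, pvLastField_append, if_neg hS, if_neg hU]

theorem pvLemB0 (ls : List String) :
    (ls.foldl pvSegStep []).map pvBlockOf = pvRun0 ls := by
  induction ls with
  | nil => rfl
  | cons l ls ih =>
      simp only [List.foldl_cons]
      by_cases hT : PySem.Str.startswith l "Title:" = true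
      · have hT2 := hT; simp at hT2
        rw [show pvSegStep [] l = [[l]] by simp [pvSegStep, hT2]]
        rw [pvLemB ls [l] (by simp), pvVals_single l hT, pvRun0, if_pos hT]
      · have hT2 := hT; simp at hT2
        rw [show pvSegStep [] l = [] by simp [pvSegStep, hT2]]
        rw [ih, pvRun0, if_neg hT]

-- ===== VERDICT (by name: the statement is the Claim_ definition above) =====
theorem parse_reference_blocks_spec : Claim_equal_parse_reference_blocks := by
  intro context _
  unfold Spec_parse_reference_blocks parse_reference_blocks parse_reference_blocks_alt
  rw [show (match ((PySem.Str.splitlines (context.getD "")).foldl pvStepA ([], none)).2 with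
      | some c => ((PySem.Str.splitlines (context.getD "")).foldl pvStepA ([], none)).1 ++ [c.items]
      | none => ((PySem.Str.splitlines (context.getD "")).foldl pvStepA ([], none)).1) =
      pvFinish ((PySem.Str.splitlines (context.getD "")).foldl pvStepA ([], none)) from rfl]
  rw [pvLemA0, pvLemB0]
  simp
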